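-- pv_equiv track=rewrite | github.com/Hadassah1999/ex1_CompBio | part1.py | initialize_spaced_spiral_grid
-- ===== SOURCE A (Python) =====
-- def initialize_spaced_spiral_grid(size):
--     """
--     Initializes the "grid" array so spaced "frames" would be created on screen.
--     As generations pass, a spiral shape would be created on screen.
--     """
--     grid = [[0 for _ in range(size)] for _ in range(size)]
--
--     left_b = 0
--     right_b = size - 1
--     top_l = 0
--     bottom_l = size - 1
--
--     while (left_b < right_b) and (top_l < bottom_l):
--         for i in range(left_b, right_b + 1):
--             grid[top_l][i] = 1
--             grid[bottom_l][i] = 1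
--
--         for i in range(top_l, bottom_l + 1):
--             grid[i][left_b] = 1
--             grid[i][right_b] = 1
--
--         top_l += 2
--         bottom_l -= 2
--         left_b += 2
--         right_b -= 2
--
--     return grid
-- ===== SOURCE B (Python) =====
-- def initialize_spaced_spiral_grid(size):
--     """Closed-form: a cell is lit iff its distance d to the nearest edge is even
--     and its frame is actually drawn (d below half of the last index); one pass over all cells."""
--     return [[1 if ((d := min(r, c, size - 1 - r, size - 1 - c)) % 2 == 0
--                    and 2 * d < size - 1) else 0
--              for c in range(size)]
--             for r in range(size)]
-- ===== Notes on version B (the rewrite author's own statement) =====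
-- stated objective: simpler
-- what changed: Replaced A's in-place inward-walking while loop that mutates the grid frame by frame with a single nested comprehension setting each cell directly from the parity and magnitude of its distance to the nearest edge.
import Mathlib
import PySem

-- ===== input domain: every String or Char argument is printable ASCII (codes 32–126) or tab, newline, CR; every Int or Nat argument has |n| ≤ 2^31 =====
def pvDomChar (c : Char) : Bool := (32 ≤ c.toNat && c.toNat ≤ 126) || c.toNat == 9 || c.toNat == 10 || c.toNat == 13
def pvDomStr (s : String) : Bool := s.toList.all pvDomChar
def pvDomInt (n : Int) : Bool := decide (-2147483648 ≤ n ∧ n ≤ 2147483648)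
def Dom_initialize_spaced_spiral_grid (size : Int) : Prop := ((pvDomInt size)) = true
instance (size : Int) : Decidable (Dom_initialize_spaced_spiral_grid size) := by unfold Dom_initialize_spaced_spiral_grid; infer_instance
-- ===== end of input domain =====

-- B replaces A's inward-walking mutating frame loop by a per-cell closed form: a cell is lit iff its
-- distance to the nearest edge is even and below half the last index (objective: simpler).


-- ===== PORT A =====
-- grid[r][c] = v  (Python list-of-lists mutation; indices are always nonnegative and in range when A performs it)
def pvSet2 (g : List (List Int)) (r c v : Int) : List (List Int) :=
  g.modify r.toNat (fun row => row.set c.toNat v)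

-- the body of one iteration of A's while loop (the two for-loops)
def pvRing (g : List (List Int)) (lb rb tl bl : Int) : List (List Int) :=
  let g1 := (PySem.List.pyRange lb (rb + 1) 1).foldl
    (fun g i => pvSet2 (pvSet2 g tl i 1) bl i 1) g
  (PySem.List.pyRange tl (bl + 1) 1).foldl
    (fun g i => pvSet2 (pvSet2 g i lb 1) i rb 1) g1

-- A's while loop
def pvLoop (g : List (List Int)) (lb rb tl bl : Int) : List (List Int) :=
  if lb < rb ∧ tl < bl then
    pvLoop (pvRing g lb rb tl bl) (lb + 2) (rb - 2) (tl + 2) (bl - 2)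
  else g
termination_by (rb - lb).toNat
decreasing_by omega

def initialize_spaced_spiral_grid (size : Int) : List (List Int) :=
  let grid := (PySem.List.pyRange 0 size 1).map
    (fun _ => (PySem.List.pyRange 0 size 1).map (fun _ => (0 : Int)))
  pvLoop grid 0 (size - 1) 0 (size - 1)

-- ===== PORT B =====
def initialize_spaced_spiral_grid_alt (size : Int) : List (List Int) :=
  (PySem.List.pyRange 0 size 1).map (fun r =>
    (PySem.List.pyRange 0 size 1).map (fun c =>
      let d := min (min (min r c) (size - 1 - r)) (size - 1 - c)
      if PySem.Int.mod d 2 = 0 ∧ 2 * d < size - 1 then (1 : Int) else 0))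

-- ===== PRECONDITION & SPEC =====
def Spec_initialize_spaced_spiral_grid (size : Int) (out : List (List Int)) : Prop := out = initialize_spaced_spiral_grid_alt size
instance (size : Int) (out : List (List Int)) : Decidable (Spec_initialize_spaced_spiral_grid size out) := by unfold Spec_initialize_spaced_spiral_grid; infer_instance

-- ===== CLAIM (what is proved, stated in full; the proofs are below) =====
def Claim_equal_initialize_spaced_spiral_grid : Prop := ∀ (size : Int), Dom_initialize_spaced_spiral_grid size → Spec_initialize_spaced_spiral_grid size (initialize_spaced_spiral_grid size)

-- ===== LEMMAS AND PROOFS =====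

-- entry (r,c) of a grid, defaulting to 0 out of range
def pvEnt (g : List (List Int)) (r c : Nat) : Int := ((g[r]?.getD [])[c]?.getD 0)

-- g is an n×n grid
def pvShape (n : Nat) (g : List (List Int)) : Prop :=
  g.length = n ∧ ∀ i : Nat, i < n → (g[i]?.getD []).length = n

-- edge distance of cell (r,c) in an n×n grid (B's d)
def pvD (n : Nat) (r c : Nat) : Int :=
  min (min (min (r : Int) (c : Int)) ((n : Int) - 1 - (r : Int))) ((n : Int) - 1 - (c : Int))

theorem pvShape_set2 {n : Nat} {g : List (List Int)} (hg : pvShape n g) (r c v : Int) :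
    pvShape n (pvSet2 g r c v) := by
  obtain ⟨h1, h2⟩ := hg
  refine ⟨by simp [pvSet2, h1], ?_⟩
  intro i hi
  simp only [pvSet2, List.getElem?_modify]
  cases hgi : g[i]? with
  | none => simp at hgi; omega
  | some row =>
    have := h2 i hi
    simp [hgi] at this ⊢
    split <;> simp [this]

theorem pvEnt_set2 {n : Nat} {g : List (List Int)} (hg : pvShape n g) (r c v : Int)
    (hr0 : 0 ≤ r) (_hrn : r < (n : Int)) (hc0 : 0 ≤ c) (_hcn : c < (n : Int))
    (r' c' : Nat) (hr' : r' < n) (hc' : c' < n) :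
    pvEnt (pvSet2 g r c v) r' c' =
      if (r' : Int) = r ∧ (c' : Int) = c then v else pvEnt g r' c' := by
  obtain ⟨h1, h2⟩ := hg
  have hrow : (g[r']?.getD []).length = n := h2 r' hr'
  have hg' : g[r']? = some (g[r']'(by omega)) := List.getElem?_eq_getElem (by omega)
  simp only [pvEnt, pvSet2, List.getElem?_modify, hg', Option.map_eq_map,
    Option.map_some, Option.getD_some]
  by_cases hre : r.toNat = r'
  · simp only [if_pos hre]
    rw [List.getElem?_set]
    have hlen : (g[r']'(by omega)).length = n := by simpa [hg'] using hrow
    by_cases hce : c.toNat = c'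
    · have : (r' : Int) = r ∧ (c' : Int) = c := by constructor <;> omega
      simp [hce, hlen, hc', this]
    · have : ¬((r' : Int) = r ∧ (c' : Int) = c) := by omega
      simp [hce, this]
  · have : ¬((r' : Int) = r ∧ (c' : Int) = c) := by
      intro ⟨h, _⟩; omega
    simp [hre, this]

-- horizontal pass: rows tl and bl get 1 in columns [a,b)
theorem pvHFold {n : Nat} (tl bl : Int)
    (htl0 : 0 ≤ tl) (htln : tl < (n : Int)) (hbl0 : 0 ≤ bl) (hbln : bl < (n : Int))
    (r c : Nat) (hr : r < n) (hc : c < n) :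
    ∀ (k : Nat) (a b : Int) (g : List (List Int)), pvShape n g → 0 ≤ a → b ≤ (n : Int) →
      (b - a).toNat ≤ k →
      pvShape n ((PySem.List.pyRange a b 1).foldl (fun g i => pvSet2 (pvSet2 g tl i 1) bl i 1) g) ∧
      pvEnt ((PySem.List.pyRange a b 1).foldl (fun g i => pvSet2 (pvSet2 g tl i 1) bl i 1) g) r c =
        if ((r : Int) = tl ∨ (r : Int) = bl) ∧ a ≤ (c : Int) ∧ (c : Int) < b then 1
        else pvEnt g r c := by
  intro k
  induction k with
  | zero =>
    intro a b g hg ha hb hk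
    rw [PySem.List.pyRange_one_eq_nil (by omega)]
    refine ⟨hg, ?_⟩
    rw [if_neg (by omega)]
    rfl
  | succ k ih =>
    intro a b g hg ha hb hk
    by_cases hab : a < b
    · rw [PySem.List.pyRange_one_cons hab]
      simp only [List.foldl_cons]
      have hg1 : pvShape n (pvSet2 g tl a 1) := pvShape_set2 hg _ _ _
      have hg2 : pvShape n (pvSet2 (pvSet2 g tl a 1) bl a 1) := pvShape_set2 hg1 _ _ _
      obtain ⟨hsh, hent⟩ := ih (a + 1) b _ hg2 (by omega) hb (by omega)
      refine ⟨hsh, ?_⟩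
      rw [hent]
      rw [pvEnt_set2 hg1 bl a 1 hbl0 hbln ha (by omega) r c hr hc]
      rw [pvEnt_set2 hg tl a 1 htl0 htln ha (by omega) r c hr hc]
      split_ifs <;> first | rfl | omega
    · rw [PySem.List.pyRange_one_eq_nil (by omega)]
      refine ⟨hg, ?_⟩
      rw [if_neg (by omega)]
      rfl

-- vertical pass: columns lb and rb get 1 in rows [a,b)
theorem pvVFold {n : Nat} (lb rb : Int)
    (hlb0 : 0 ≤ lb) (hlbn : lb < (n : Int)) (hrb0 : 0 ≤ rb) (hrbn : rb < (n : Int))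
    (r c : Nat) (hr : r < n) (hc : c < n) :
    ∀ (k : Nat) (a b : Int) (g : List (List Int)), pvShape n g → 0 ≤ a → b ≤ (n : Int) →
      (b - a).toNat ≤ k →
      pvShape n ((PySem.List.pyRange a b 1).foldl (fun g i => pvSet2 (pvSet2 g i lb 1) i rb 1) g) ∧
      pvEnt ((PySem.List.pyRange a b 1).foldl (fun g i => pvSet2 (pvSet2 g i lb 1) i rb 1) g) r c =
        if ((c : Int) = lb ∨ (c : Int) = rb) ∧ a ≤ (r : Int) ∧ (r : Int) < b then 1
        else pvEnt g r c := by
  intro k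
  induction k with
  | zero =>
    intro a b g hg ha hb hk
    rw [PySem.List.pyRange_one_eq_nil (by omega)]
    refine ⟨hg, ?_⟩
    rw [if_neg (by omega)]
    rfl
  | succ k ih =>
    intro a b g hg ha hb hk
    by_cases hab : a < b
    · rw [PySem.List.pyRange_one_cons hab]
      simp only [List.foldl_cons]
      have hg1 : pvShape n (pvSet2 g a lb 1) := pvShape_set2 hg _ _ _
      have hg2 : pvShape n (pvSet2 (pvSet2 g a lb 1) a rb 1) := pvShape_set2 hg1 _ _ _
      obtain ⟨hsh, hent⟩ := ih (a + 1) b _ hg2 (by omega) hb (by omega)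
      refine ⟨hsh, ?_⟩
      rw [hent]
      rw [pvEnt_set2 hg1 a rb 1 ha (by omega) hrb0 hrbn r c hr hc]
      rw [pvEnt_set2 hg a lb 1 ha (by omega) hlb0 hlbn r c hr hc]
      split_ifs <;> first | rfl | omega
    · rw [PySem.List.pyRange_one_eq_nil (by omega)]
      refine ⟨hg, ?_⟩
      rw [if_neg (by omega)]
      rfl

-- one while-loop iteration on the square [o, n-1-o]²: marks exactly the cells with pvD = o
theorem pvRing_ent {n : Nat} (o : Int) (ho : 0 ≤ o) (hom : o < (n : Int) - 1 - o)
    (r c : Nat) (hr : r < n) (hc : c < n)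
    (g : List (List Int)) (hg : pvShape n g) :
    pvShape n (pvRing g o ((n : Int) - 1 - o) o ((n : Int) - 1 - o)) ∧
    pvEnt (pvRing g o ((n : Int) - 1 - o) o ((n : Int) - 1 - o)) r c =
      if pvD n r c = o then 1 else pvEnt g r c := by
  have hm0 : 0 ≤ (n : Int) - 1 - o := by omega
  have hmn : (n : Int) - 1 - o < (n : Int) := by omega
  obtain ⟨hsh1, hent1⟩ := pvHFold (n := n) o ((n : Int) - 1 - o) ho (by omega) hm0 hmn r c hr hc
    ((n : Int) - 1 - o + 1 - o).toNat o ((n : Int) - 1 - o + 1) g hg ho (by omega) (by omega)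
  obtain ⟨hsh2, hent2⟩ := pvVFold (n := n) o ((n : Int) - 1 - o) ho (by omega) hm0 hmn r c hr hc
    ((n : Int) - 1 - o + 1 - o).toNat o ((n : Int) - 1 - o + 1) _ hsh1 ho (by omega) (by omega)
  refine ⟨hsh2, ?_⟩
  show pvEnt ((PySem.List.pyRange o ((n : Int) - 1 - o + 1) 1).foldl _ _) r c = _
  rw [hent2, hent1]
  simp only [pvD]
  split_ifs <;> first | rfl | omega

-- A's while loop starting at offset o marks exactly the cells with pvD ≥ o, pvD - o even, 2·pvD < n-1
theorem pvLoop_ent {n : Nat} (r c : Nat) (hr : r < n) (hc : c < n) :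
    ∀ (k : Nat) (o : Int) (g : List (List Int)), pvShape n g → 0 ≤ o →
      ((n : Int) - 1 - 2 * o).toNat ≤ k →
      pvShape n (pvLoop g o ((n : Int) - 1 - o) o ((n : Int) - 1 - o)) ∧
      pvEnt (pvLoop g o ((n : Int) - 1 - o) o ((n : Int) - 1 - o)) r c =
        if o ≤ pvD n r c ∧ (pvD n r c - o) % 2 = 0 ∧ 2 * pvD n r c < (n : Int) - 1 then 1
        else pvEnt g r c := by
  have hd0 : 0 ≤ pvD n r c := by simp only [pvD]; omega
  intro k
  induction k with
  | zero =>
    intro o g hg ho hk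
    rw [pvLoop, if_neg (by omega)]
    refine ⟨hg, ?_⟩
    rw [if_neg (by omega)]
  | succ k ih =>
    intro o g hg ho hk
    by_cases hcond : o < (n : Int) - 1 - o
    · rw [pvLoop, if_pos ⟨hcond, hcond⟩]
      obtain ⟨hshR, hentR⟩ := pvRing_ent o ho hcond r c hr hc g hg
      have harg : (n : Int) - 1 - o - 2 = (n : Int) - 1 - (o + 2) := by ring
      rw [harg]
      obtain ⟨hsh, hent⟩ := ih (o + 2) _ hshR (by omega) (by omega)
      refine ⟨hsh, ?_⟩
      rw [hent, hentR]
      split_ifs <;> first | rfl | omega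
    · rw [pvLoop, if_neg (by simp [hcond])]
      refine ⟨hg, ?_⟩
      rw [if_neg (by omega)]

theorem pvGrid0_eq (n : Nat) :
    (PySem.List.pyRange 0 (n : Int) 1).map
      (fun _ => (PySem.List.pyRange 0 (n : Int) 1).map (fun _ => (0 : Int))) =
    List.replicate n (List.replicate n (0 : Int)) := by
  have hlen : (PySem.List.pyRange 0 (n : Int) 1).length = n := by
    simp [PySem.List.length_pyRange_one]
  have hinner : (PySem.List.pyRange 0 (n : Int) 1).map (fun _ => (0 : Int)) =
      List.replicate n (0 : Int) := by
    rw [show (fun (_ : Int) => (0 : Int)) = Function.const Int (0 : Int) from rfl,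
      List.map_const, hlen]
  rw [hinner, show (fun (_ : Int) => List.replicate n (0 : Int)) =
      Function.const Int (List.replicate n (0 : Int)) from rfl, List.map_const, hlen]

theorem pvGrid0_shape (n : Nat) :
    pvShape n (List.replicate n (List.replicate n (0 : Int))) := by
  refine ⟨by simp, ?_⟩
  intro i hi
  simp [hi]

theorem pvGrid0_ent (n : Nat) (r c : Nat) :
    pvEnt (List.replicate n (List.replicate n (0 : Int))) r c = 0 := by
  simp only [pvEnt, List.getElem?_replicate]
  by_cases hr : r < n <;> by_cases hc : c < n <;> simp [hr, hc]

theorem pvAlt_shape (n : Nat) :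
    pvShape n (initialize_spaced_spiral_grid_alt (n : Int)) := by
  refine ⟨by simp [initialize_spaced_spiral_grid_alt, PySem.List.length_pyRange_one], ?_⟩
  intro i hi
  simp only [initialize_spaced_spiral_grid_alt]
  rw [PySem.List.getElem?_map_pyRange_zero _ n i hi]
  simp [PySem.List.length_pyRange_one]

theorem pvAlt_ent (n : Nat) (r c : Nat) (hr : r < n) (hc : c < n) :
    pvEnt (initialize_spaced_spiral_grid_alt (n : Int)) r c =
      if PySem.Int.mod (pvD n r c) 2 = 0 ∧ 2 * pvD n r c < (n : Int) - 1 then (1 : Int)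
      else 0 := by
  simp only [pvEnt, initialize_spaced_spiral_grid_alt]
  rw [PySem.List.getElem?_map_pyRange_zero _ n r hr]
  simp only [Option.getD_some]
  rw [PySem.List.getElem?_map_pyRange_zero _ n c hc]
  simp only [Option.getD_some, pvD]
  rfl

theorem pvEq_of_shape_ent {n : Nat} {g1 g2 : List (List Int)}
    (h1 : pvShape n g1) (h2 : pvShape n g2)
    (he : ∀ r c : Nat, r < n → c < n → pvEnt g1 r c = pvEnt g2 r c) : g1 = g2 := by
  obtain ⟨hl1, hrow1⟩ := h1
  obtain ⟨hl2, hrow2⟩ := h2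
  apply List.ext_getElem (by omega)
  intro r hr1 hr2
  have hg1 : g1[r]? = some (g1[r]'hr1) := List.getElem?_eq_getElem hr1
  have hg2 : g2[r]? = some (g2[r]'hr2) := List.getElem?_eq_getElem hr2
  have hlr1 : (g1[r]'hr1).length = n := by
    have := hrow1 r (by omega); simpa [hg1] using this
  have hlr2 : (g2[r]'hr2).length = n := by
    have := hrow2 r (by omega); simpa [hg2] using this
  apply List.ext_getElem (by omega)
  intro c hc1 hc2
  have := he r c (by omega) (by omega)
  simp only [pvEnt, hg1, hg2, Option.getD_some] at this
  rw [List.getElem?_eq_getElem hc1, List.getElem?_eq_getElem hc2] at this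
  simpa using this

-- ===== VERDICT (by name: the statement is the Claim_ definition above) =====
theorem initialize_spaced_spiral_grid_spec : Claim_equal_initialize_spaced_spiral_grid := by
  intro size _
  unfold Spec_initialize_spaced_spiral_grid
  by_cases hpos : 0 < size
  · obtain ⟨n, rfl⟩ : ∃ n : Nat, size = (n : Int) := ⟨size.toNat, by omega⟩
    have hn0 : 0 < n := by exact_mod_cast hpos
    simp only [initialize_spaced_spiral_grid, pvGrid0_eq n]
    have hg0 := pvGrid0_shape n
    have harg : (n : Int) - 1 = (n : Int) - 1 - 0 := by ring
    rw [harg]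
    obtain ⟨hshA, _⟩ := pvLoop_ent (n := n) 0 0 hn0 hn0 ((n : Int) - 1).toNat 0 _ hg0 le_rfl (by omega)
    apply pvEq_of_shape_ent hshA (pvAlt_shape n)
    intro r c hr hc
    obtain ⟨_, hent⟩ := pvLoop_ent (n := n) r c hr hc ((n : Int) - 1).toNat 0 _ hg0 le_rfl (by omega)
    rw [hent, pvGrid0_ent n r c, pvAlt_ent n r c hr hc]
    have hd0 : 0 ≤ pvD n r c := by simp only [pvD]; omega
    have hmod : PySem.Int.mod (pvD n r c) 2 = pvD n r c % 2 := by
      simp only [PySem.Int.mod]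
      rw [Int.fmod_eq_emod]
      omega
    rw [hmod]
    split_ifs <;> first | rfl | omega
  · have hnil : PySem.List.pyRange 0 size 1 = [] := PySem.List.pyRange_one_eq_nil (by omega)
    simp only [initialize_spaced_spiral_grid, initialize_spaced_spiral_grid_alt, hnil, List.map_nil]
    rw [pvLoop, if_neg (by omega)]
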